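-- pv_equiv track=rewrite | github.com/grigolp/traffic-puzzle | tests/test_movement_calculation.py | add_exits_to_layout
-- ===== SOURCE A (Python) =====
-- def add_exits_to_layout(layout):
--     """Add exit nodes around the perimeter of the layout"""
--     height = len(layout)
--     width = len(layout[0])
--     exit_row = ['E'] * (width + 2)
--     layout_with_exits = [exit_row]
--     for row in layout:
--         layout_with_exits.append(['E'] + row + ['E'])
--     layout_with_exits.append(exit_row)
--     return layout_with_exits, width + 2, height + 2
-- ===== SOURCE B (Python) =====
-- def add_exits_to_layout(layout):
--     """Add exit nodes around the perimeter of the layout (cell-wise construction)"""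
--     height = len(layout)
--     width = len(layout[0])
--
--     def build_row(i):
--         if i == 0 or i == height + 1:
--             return ['E'] * (width + 2)
--         inner = layout[i - 1]
--         n = len(inner)
--         return ['E' if j == 0 or j == n + 1 else inner[j - 1] for j in range(n + 2)]
--
--     return [build_row(i) for i in range(height + 2)], width + 2, height + 2
-- ===== Notes on version B (the rewrite author's own statement) =====
-- stated objective: alternative
-- what changed: B constructs the padded grid cell-wise by index (mapping over row/column ranges with border tests) instead of A's sequential append of concatenated rows around a shared border row.
import Mathlib
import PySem

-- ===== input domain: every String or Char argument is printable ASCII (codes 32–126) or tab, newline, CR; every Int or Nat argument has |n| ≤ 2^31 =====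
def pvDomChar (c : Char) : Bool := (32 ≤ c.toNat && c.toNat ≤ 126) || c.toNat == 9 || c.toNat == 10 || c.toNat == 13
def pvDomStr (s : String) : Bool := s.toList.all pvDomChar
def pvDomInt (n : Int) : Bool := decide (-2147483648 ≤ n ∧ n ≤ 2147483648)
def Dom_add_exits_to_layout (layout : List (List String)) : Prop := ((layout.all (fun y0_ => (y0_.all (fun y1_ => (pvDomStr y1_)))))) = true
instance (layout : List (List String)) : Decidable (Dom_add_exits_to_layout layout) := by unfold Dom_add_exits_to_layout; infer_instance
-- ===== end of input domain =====

-- B builds the padded grid cell-wise by index instead of A's sequential row appends: an alternative decomposition, same cost.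

-- ===== PORT A =====
def add_exits_to_layout (layout : List (List String)) : List (List String) × Int × Int :=
  let height : Int := (layout.length : Int)
  let row0 : List String := (PySem.List.pyGet? layout 0).getD []   -- layout[0]; Pre_ guarantees it exists
  let width : Int := (row0.length : Int)
  let exit_row : List String := List.replicate (row0.length + 2) "E"
  let layout_with_exits :=
    layout.foldl (fun acc row => acc ++ [["E"] ++ row ++ ["E"]]) [exit_row]
  (layout_with_exits ++ [exit_row], width + 2, height + 2)

-- ===== PORT B =====
def add_exits_to_layout_alt (layout : List (List String)) : List (List String) × Int × Int :=
  let height : Int := (layout.length : Int)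
  let row0 : List String := (PySem.List.pyGet? layout 0).getD []   -- layout[0]; Pre_ guarantees it exists
  let width : Int := (row0.length : Int)
  let build_row : Int → List String := fun i =>
    if i == 0 || i == height + 1 then
      List.replicate (row0.length + 2) "E"
    else
      let inner : List String := (PySem.List.pyGet? layout (i - 1)).getD []
      (PySem.List.pyRange 0 ((inner.length : Int) + 2) 1).map (fun j =>
        if j == 0 || j == (inner.length : Int) + 1 then "E"
        else (PySem.List.pyGet? inner (j - 1)).getD "")
  ((PySem.List.pyRange 0 (height + 2) 1).map build_row, width + 2, height + 2)

-- ===== PRECONDITION & SPEC =====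
-- Pre_ excludes only the empty layout, on which Python A raises IndexError at layout[0].
def Pre_add_exits_to_layout (layout : List (List String)) : Prop := layout ≠ []
instance (layout : List (List String)) : Decidable (Pre_add_exits_to_layout layout) := by
  unfold Pre_add_exits_to_layout; infer_instance
def pvWitness_add_exits_to_layout : List (List String) := [["a", "b"], ["c", "d"]]
def Spec_add_exits_to_layout (layout : List (List String)) (out : List (List String) × Int × Int) : Prop := out = add_exits_to_layout_alt layout
instance (layout : List (List String)) (out : List (List String) × Int × Int) : Decidable (Spec_add_exits_to_layout layout out) := by unfold Spec_add_exits_to_layout; infer_instance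

-- ===== CLAIM (what is proved, stated in full; the proofs are below) =====
def Claim_equal_add_exits_to_layout : Prop := ∀ (layout : List (List String)), Dom_add_exits_to_layout layout → Pre_add_exits_to_layout layout → Spec_add_exits_to_layout layout (add_exits_to_layout layout)

-- ===== LEMMAS AND PROOFS =====

-- A map over range (n+2) whose value is `a` at both ends and mid[i-1] inside is the sandwich [a] ++ mid ++ [a].
lemma sandwich_map {A : Type} (n : Nat) (F : Nat → A) (a : A) (mid : List A)
    (hmid : mid.length = n) (h0 : F 0 = a) (hlast : F (n + 1) = a)
    (hin : ∀ k (hk : k < n), F (k + 1) = mid[k]) :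
    (List.range (n + 2)).map F = [a] ++ mid ++ [a] := by
  apply List.ext_getElem
  · simp [hmid]
  · intro i h1 h2
    simp only [List.getElem_map, List.getElem_range]
    by_cases hz : i = 0
    · subst hz; simpa using h0
    · obtain ⟨k, rfl⟩ : ∃ k, i = k + 1 := ⟨i - 1, by omega⟩
      by_cases hk : k = n
      · subst hk
        rw [hlast]
        simp [List.getElem_cons, hmid]
      · have hk' : k < n := by
          simp only [List.length_map, List.length_range] at h1; omega
        rw [hin k hk']
        have hkm : k < mid.length := by omega
        simp [hkm]

-- One interior row built cell-wise equals the row wrapped in 'E's.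
lemma row_cellwise_eq (l : List String) :
    (PySem.List.pyRange 0 ((l.length : Int) + 2) 1).map (fun j =>
        if j == 0 || j == (l.length : Int) + 1 then "E"
        else (PySem.List.pyGet? l (j - 1)).getD "")
    = ["E"] ++ l ++ ["E"] := by
  rw [PySem.List.pyRange_one]
  have hn : (((l.length : Int) + 2 - 0)).toNat = l.length + 2 := by omega
  rw [hn, List.map_map]
  apply sandwich_map l.length _ "E" l rfl
  · simp
  · simp
  · intro k hk
    simp only [Function.comp_apply]
    rw [if_neg (by simp; omega)]
    have hidx : (0 : Int) + ((k : Nat) + 1 : Nat) - 1 = ((k : Nat) : Int) := by push_cast; ring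
    rw [hidx, PySem.List.pyGet?_natCast, List.getElem?_eq_getElem hk]
    rfl

theorem add_exits_to_layout_spec : Claim_equal_add_exits_to_layout := by
  intro layout hdom hpre
  unfold Spec_add_exits_to_layout add_exits_to_layout add_exits_to_layout_alt
  simp only []
  rw [PySem.List.foldl_append_singleton_eq_map]
  refine Prod.ext ?_ rfl
  show ([List.replicate _ "E"] ++ layout.map _ ++ [List.replicate _ "E"])
      = (PySem.List.pyRange 0 ((layout.length : Int) + 2) 1).map _
  rw [PySem.List.pyRange_one]
  have hn : (((layout.length : Int) + 2 - 0)).toNat = layout.length + 2 := by omega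
  rw [hn, List.map_map]
  refine (sandwich_map layout.length _ _ (layout.map fun row => ["E"] ++ row ++ ["E"])
    (by simp) ?_ ?_ ?_).symm
  · simp
  · have hc : ((0 : Int) + ((layout.length : Nat) + 1 : Nat) == 0
        || (0 : Int) + ((layout.length : Nat) + 1 : Nat) == (layout.length : Int) + 1) = true := by
      simp
    simp only [Function.comp_apply]
    rw [if_pos hc]
  · intro k hk
    simp only [Function.comp_apply]
    rw [if_neg (by simp; omega)]
    have hidx : (0 : Int) + ((k : Nat) + 1 : Nat) - 1 = ((k : Nat) : Int) := by push_cast; ring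
    rw [hidx, PySem.List.pyGet?_natCast, List.getElem?_eq_getElem hk]
    simp only [Option.getD_some]
    rw [row_cellwise_eq]
    simp [List.getElem_map]
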